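-- pv_equiv track=rewrite | github.com/GAMS-dev/gdx | src/yaml2doxy.py | collect_groups
-- ===== SOURCE A (Python) =====
-- def collect_groups(functions):
--     groups = []
--     gtf = {}
--     for f in functions:
--         for name, attrs in f.items():
--             group = None if 'group' not in attrs else attrs['group']
--             if group and group not in groups:
--                 groups.append(group)
--             if group in gtf:
--                 gtf[group].append(f)
--             else:
--                 gtf[group] = [f]
--     groups = [None] + sorted(groups)
--     return groups, gtf
-- ===== SOURCE B (Python) =====
-- def collect_groups(functions):
--     pairs = [(attrs.get('group'), f) for f in functions for attrs in f.values()]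
--     keys = list(dict.fromkeys(g for g, _ in pairs))
--     gtf = {g: [f for g2, f in pairs if g2 == g] for g in keys}
--     groups = [None] + sorted(g for g in keys if g)
--     return groups, gtf
-- ===== Notes on version B (the rewrite author's own statement) =====
-- stated objective: alternative
-- what changed: B replaces A's single incremental pass (membership-checked groups list plus two-branch dict update) by staged passes: flatten all (group, function) pairs, dedup the group keys once via dict.fromkeys, then build each gtf entry by filtering the flat pair list per key and recover the sorted truthy names from the keys.
import Mathlib
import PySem

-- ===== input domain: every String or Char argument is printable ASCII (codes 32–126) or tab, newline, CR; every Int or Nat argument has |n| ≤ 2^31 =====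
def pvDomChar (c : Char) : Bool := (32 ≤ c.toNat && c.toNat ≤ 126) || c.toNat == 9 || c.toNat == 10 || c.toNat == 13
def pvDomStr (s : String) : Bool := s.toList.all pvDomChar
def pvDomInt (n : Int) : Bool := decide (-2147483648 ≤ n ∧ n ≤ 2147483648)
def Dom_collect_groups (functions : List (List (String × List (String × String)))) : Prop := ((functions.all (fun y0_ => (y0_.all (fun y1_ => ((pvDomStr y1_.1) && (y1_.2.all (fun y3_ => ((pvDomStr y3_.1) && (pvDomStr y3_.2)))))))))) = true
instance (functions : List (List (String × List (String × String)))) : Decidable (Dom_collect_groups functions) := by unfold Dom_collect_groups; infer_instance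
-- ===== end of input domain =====

-- B rebuilds the result in staged passes (flatten pairs, dedup keys, per-key filter) instead of A's single incremental pass (objective: alternative).


-- ===== PORT A =====
-- A's inner-loop step: update (groups, gtf) for one (name, attrs) item of the dict f
def pvStepA (f : List (String × List (String × String)))
    (st : List String × PySem.Dict (Option String) (List (List (String × List (String × String)))))
    (p : String × List (String × String)) :
    List String × PySem.Dict (Option String) (List (List (String × List (String × String)))) :=
  -- group = None if 'group' not in attrs else attrs['group']
  let group : Option String := PySem.Dict.get? (PySem.Dict.mk p.2) "group"
  -- if group and group not in groups: groups.append(group)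
  let groups :=
    match group with
    | some v => if v ≠ "" ∧ v ∉ st.1 then st.1 ++ [v] else st.1
    | none => st.1
  -- if group in gtf: gtf[group].append(f) else: gtf[group] = [f]
  let gtf :=
    if (st.2).contains group then (st.2).modify group [] (· ++ [f]) else (st.2).insert group [f]
  (groups, gtf)

def collect_groups (functions : List (List (String × List (String × String)))) :
    List (Option String) × (List (Option String × List (List (String × List (String × String))))) :=
  let st := functions.foldl (fun st f => f.foldl (pvStepA f) st) ([], PySem.Dict.empty)
  -- groups = [None] + sorted(groups)
  (none :: (PySem.List.sorted st.1 (fun x => x) false).map some, (st.2).items)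

-- ===== PORT B =====
-- the truthiness filter of B's comprehensions: keep g only 'if g'
def pvTruthy (k : Option String) : Option String :=
  match k with
  | some v => if v = "" then none else some v
  | none => none

-- pairs = [(attrs.get('group'), f) for f in functions for attrs in f.values()]
def pvPairs (functions : List (List (String × List (String × String)))) :
    List (Option String × List (String × List (String × String))) :=
  functions.flatMap (fun f => f.map (fun p => (PySem.Dict.get? (PySem.Dict.mk p.2) "group", f)))

def collect_groups_alt (functions : List (List (String × List (String × String)))) :
    List (Option String) × (List (Option String × List (List (String × List (String × String))))) :=
  let pairs := pvPairs functions
  -- keys = list(dict.fromkeys(g for g, _ in pairs))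
  let keys := PySem.List.dedup (pairs.map (·.1))
  -- gtf = {g: [f for g2, f in pairs if g2 == g] for g in keys}
  let gtf := keys.map (fun g => (g, (pairs.filter (fun q => q.1 == g)).map (·.2)))
  -- groups = [None] + sorted(g for g in keys if g)
  (none :: (PySem.List.sorted (keys.filterMap pvTruthy) (fun x => x) false).map some, gtf)

-- ===== PRECONDITION & SPEC =====
def Spec_collect_groups (functions : List (List (String × List (String × String)))) (out : List (Option String) × (List (Option String × List (List (String × List (String × String)))))) : Prop := out = collect_groups_alt functions
instance (functions : List (List (String × List (String × String)))) (out : List (Option String) × (List (Option String × List (List (String × List (String × String)))))) : Decidable (Spec_collect_groups functions out) := by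
  unfold Spec_collect_groups
  exact @instDecidableEqProd _ _ (by infer_instance)
    (@instDecidableEqList _ (@instDecidableEqProd _ _ (by infer_instance) (by infer_instance))) _ _

-- ===== CLAIM (what is proved, stated in full; the proofs are below) =====
def Claim_equal_collect_groups : Prop := ∀ (functions : List (List (String × List (String × String)))), Dom_collect_groups functions → Spec_collect_groups functions (collect_groups functions)

-- ===== LEMMAS AND PROOFS =====

-- A's step, rephrased on one flattened (group, f) pair: the two state components evolve independently
def pvG (acc : List String) (q : Option String × List (String × List (String × String))) : List String :=
  match q.1 with
  | some v => if v ≠ "" ∧ v ∉ acc then acc ++ [v] else acc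
  | none => acc

def pvD (d : PySem.Dict (Option String) (List (List (String × List (String × String)))))
    (q : Option String × List (String × List (String × String))) :
    PySem.Dict (Option String) (List (List (String × List (String × String)))) :=
  d.modify q.1 [] (· ++ [q.2])

theorem pvStepA_eq (f : List (String × List (String × String))) (p : String × List (String × String)) st :
    pvStepA f st p = (pvG st.1 (PySem.Dict.get? (PySem.Dict.mk p.2) "group", f),
      pvD st.2 (PySem.Dict.get? (PySem.Dict.mk p.2) "group", f)) := by
  unfold pvStepA pvG pvD
  dsimp only
  congr 1
  set g : Option String := PySem.Dict.get? (PySem.Dict.mk p.2) "group"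
  by_cases hc : (st.2).contains g = true
  · simp [hc, PySem.Dict.modify]
  · rw [if_neg (by simpa using hc)]
    simp [PySem.Dict.modify, PySem.Dict.getD_of_not_contains _ _ (by simpa using hc)]

theorem pvFold_eq (functions : List (List (String × List (String × String)))) (st) :
    functions.foldl (fun st f => f.foldl (pvStepA f) st) st =
      (pvPairs functions).foldl (fun s e => (pvG s.1 e, pvD s.2 e)) st := by
  induction functions generalizing st with
  | nil => rfl
  | cons f fs ih =>
    simp only [List.foldl_cons, pvPairs, List.flatMap_cons, List.foldl_append]
    rw [ih]
    congr 1
    rw [List.foldl_map]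
    exact PySem.List.foldl_congr_mem _ _ _ _ (fun st p _ => pvStepA_eq f p st)

theorem pvMem_filterMap_truthy (ks : List (Option String)) (v : String) (hv : v ≠ "") :
    v ∈ ks.filterMap pvTruthy ↔ some v ∈ ks := by
  simp only [List.mem_filterMap]
  constructor
  · rintro ⟨k, hk, he⟩
    cases k with
    | none => simp [pvTruthy] at he
    | some w =>
      simp only [pvTruthy] at he
      split at he
      · simp at he
      · simp at he; subst he; exact hk
  · intro h
    exact ⟨some v, h, by simp [pvTruthy, hv]⟩

-- the groups component of the fold is the truthy-filtered deduped key list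
theorem pvGroups_eq (L : List (Option String × List (String × List (String × String)))) :
    L.foldl pvG [] = (PySem.List.dedup (L.map (·.1))).filterMap pvTruthy := by
  induction L using List.reverseRecOn with
  | nil => rfl
  | append_singleton L q ih =>
    rw [List.foldl_append, List.foldl_cons, List.foldl_nil, ih]
    simp only [List.map_append, List.map_cons, List.map_nil, PySem.List.dedup_eq_ofList,
      PySem.Set.ofList_append_singleton, PySem.Set.add_eq_ite]
    unfold pvG
    cases hq : q.1 with
    | none =>
      dsimp only
      split
      · rfl
      · simp [pvTruthy]
    | some v =>
      dsimp only
      by_cases hv : v = ""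
      · subst hv
        simp only [ne_eq, not_true_eq_false, false_and, if_false]
        split
        · rfl
        · simp [pvTruthy]
      · have hmem : v ∈ (PySem.Set.ofList (L.map (·.1))).filterMap pvTruthy ↔
            some v ∈ PySem.Set.ofList (L.map (·.1)) := pvMem_filterMap_truthy _ v hv
        by_cases hm : some v ∈ PySem.Set.ofList (L.map (·.1))
        · rw [if_pos hm, if_neg (by simp [hv, hmem.2 hm])]
        · rw [if_neg hm, if_pos ⟨hv, fun h => hm (hmem.1 h)⟩]
          simp [pvTruthy, hv]

-- ===== VERDICT (by name: the statement is the Claim_ definition above) =====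
theorem collect_groups_spec : Claim_equal_collect_groups := by
  intro functions _
  show collect_groups functions = collect_groups_alt functions
  simp only [collect_groups, collect_groups_alt]
  rw [pvFold_eq]
  rw [PySem.List.foldl_prod_mk pvG pvD]
  have hnodup : ((pvPairs functions).foldl pvD PySem.Dict.empty).keys.Nodup := by
    unfold pvD
    exact PySem.Dict.nodup_keys_foldl_modify_key (pvPairs functions) (·.1) []
      (fun _ q ys => ys ++ [q.2]) PySem.Dict.empty (by simp [PySem.Dict.keys_empty])
  have hkeys : ((pvPairs functions).foldl pvD PySem.Dict.empty).keys =
      PySem.List.dedup ((pvPairs functions).map (·.1)) := by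
    unfold pvD
    rw [PySem.Dict.keys_foldl_modify_key (pvPairs functions) (·.1) [] (fun _ q ys => ys ++ [q.2])]
    simp [PySem.Dict.keys_empty, PySem.Set.update_nil_left]
  congr 1
  · rw [pvGroups_eq]
  · rw [PySem.Dict.items_eq_map_keys _ hnodup [], hkeys]
    refine List.map_congr_left (fun g _ => ?_)
    unfold pvD
    rw [PySem.Dict.getD_foldl_modify_append]
    simp [PySem.Dict.getD_empty]
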